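-- pv_equiv track=rewrite | github.com/CXJJYSH/My-Code | 算法/力扣/灵神/讲解/基础算法精讲/02 双指针/03 题单/01 单序列双指针/01 反转字符串/01 基础/06 1 3823. 反转一个字符串里的字母后反转特殊字符.py | reverseByType
-- ===== SOURCE A (Python) =====
-- def reverseByType(s: str) -> str:
--     s = list(s)
--     n = len(s)
--
--     left = 0
--     right = n - 1
--     while left <= right:
--         if s[left].islower() and s[right].islower():
--             s[left], s[right] = s[right], s[left]
--             left += 1
--             right -= 1
--
--         while left < n and not s[left].islower():
--             left += 1
--         while right >= 0 and not s[right].islower():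
--             right -= 1
--
--     left = 0
--     right = n - 1
--     while left <= right:
--         if not s[left].islower() and not s[right].islower():
--             s[left], s[right] = s[right], s[left]
--             left += 1
--             right -= 1
--
--         while left < n and s[left].islower():
--             left += 1
--         while right >= 0 and s[right].islower():
--             right -= 1
--
--     return "".join(s)
-- ===== SOURCE B (Python) =====
-- def reverseByType(s: str) -> str:
--     # partition, reverse each class, then re-interleave in one pass
--     lows = [c for c in s if c.islower()][::-1]
--     others = [c for c in s if not c.islower()][::-1]
--     out = []
--     i = j = 0
--     for c in s:
--         if c.islower():
--             out.append(lows[i])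
--             i += 1
--         else:
--             out.append(others[j])
--             j += 1
--     return "".join(out)
-- ===== Notes on version B (the rewrite author's own statement) =====
-- stated objective: alternative
-- what changed: Replaces A's two in-place two-pointer swap passes over the char array by a partition of the string into lowercase and non-lowercase chars, reversing each partition and re-interleaving them in a single forward pass.
import Mathlib
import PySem

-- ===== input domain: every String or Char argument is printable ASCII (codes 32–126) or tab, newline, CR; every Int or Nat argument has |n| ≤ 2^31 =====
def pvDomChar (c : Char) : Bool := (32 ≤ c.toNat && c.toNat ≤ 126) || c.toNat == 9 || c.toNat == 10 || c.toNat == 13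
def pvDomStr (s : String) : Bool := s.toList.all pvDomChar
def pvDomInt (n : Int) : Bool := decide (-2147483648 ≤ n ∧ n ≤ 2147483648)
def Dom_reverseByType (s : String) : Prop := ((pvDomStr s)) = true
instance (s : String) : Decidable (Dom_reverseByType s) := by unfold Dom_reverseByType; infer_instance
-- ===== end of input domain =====

-- B replaces A's two in-place two-pointer swap passes by partition/reverse/re-interleave (objective: alternative decomposition, same O(n) cost).

-- ===== PORT A =====
-- A's two while-loops are the same code modulo the predicate (islower vs not islower);
-- they are ported as one parametric loop `pvPass` applied twice.
-- Indices are in range and nonnegative whenever an access is executed, so the total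
-- forms pyGetD / pySetD are exact here.
def pvGet (s : List Char) (i : Int) : Char := PySem.List.pyGetD s i ' '

-- while left < n and not q(s[left]): left += 1
def pvSkipL (q : Char → Bool) (s : List Char) (l : Int) : Int :=
  if _h : l < (s.length : Int) ∧ ¬ q (pvGet s l) then pvSkipL q s (l + 1) else l
termination_by ((s.length : Int) - l).toNat
decreasing_by omega

-- while right >= 0 and not q(s[right]): right -= 1
def pvSkipR (q : Char → Bool) (s : List Char) (r : Int) : Int :=
  if _h : 0 ≤ r ∧ ¬ q (pvGet s r) then pvSkipR q s (r - 1) else r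
termination_by (r + 1).toNat
decreasing_by omega

-- while left <= right: if q(s[left]) and q(s[right]): swap, left += 1, right -= 1; then the two skip loops.
-- fuel = n+1 iterations always suffices (right - left strictly decreases each iteration; proved below).
def pvPass (q : Char → Bool) : Nat → List Char → Int → Int → List Char
  | 0, s, _, _ => s
  | fuel + 1, s, l, r =>
    if l ≤ r then
      let st :=
        if q (pvGet s l) && q (pvGet s r) then
          (PySem.List.pySetD (PySem.List.pySetD s l (pvGet s r)) r (pvGet s l), l + 1, r - 1)
        else (s, l, r)
      pvPass q fuel st.1 (pvSkipL q st.1 st.2.1) (pvSkipR q st.1 st.2.2)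
    else s

def reverseByType (s : String) : String :=
  let cs := s.toList
  let n := cs.length
  let s1 := pvPass (fun c => PySem.Chars.islower c) (n + 1) cs 0 ((n : Int) - 1)
  let s2 := pvPass (fun c => !PySem.Chars.islower c) (n + 1) s1 0 ((n : Int) - 1)
  String.ofList s2

-- ===== PORT B =====
-- one pass over s, consuming the two reversed buffers by position (i / j in Source B);
-- headD's default is never used (each buffer holds exactly the right number of chars).
def pvInterleave : List Char → List Char → List Char → List Char
  | [], _, _ => []
  | c :: rest, ls, os =>
    if PySem.Chars.islower c then ls.headD c :: pvInterleave rest ls.tail os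
    else os.headD c :: pvInterleave rest ls os.tail

def reverseByType_alt (s : String) : String :=
  let cs := s.toList
  let lows := (cs.filter (fun c => PySem.Chars.islower c)).reverse
  let others := (cs.filter (fun c => !PySem.Chars.islower c)).reverse
  String.ofList (pvInterleave cs lows others)

-- ===== PRECONDITION & SPEC =====
def Spec_reverseByType (s : String) (out : String) : Prop := out = reverseByType_alt s
instance (s : String) (out : String) : Decidable (Spec_reverseByType s out) := by unfold Spec_reverseByType; infer_instance

-- ===== CLAIM (what is proved, stated in full; the proofs are below) =====
def Claim_equal_reverseByType : Prop := ∀ (s : String), Dom_reverseByType s → Spec_reverseByType s (reverseByType s)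

-- ===== LEMMAS AND PROOFS =====

-- replace the q-positions of cs by successive elements of vs, everything else untouched
def pvRepl (q : Char → Bool) : List Char → List Char → List Char
  | [], _ => []
  | c :: rest, vs => if q c then vs.headD c :: pvRepl q rest vs.tail else c :: pvRepl q rest vs

theorem pvRepl_length (q : Char → Bool) (cs vs : List Char) :
    (pvRepl q cs vs).length = cs.length := by
  induction cs generalizing vs with
  | nil => rfl
  | cons c rest ih => simp only [pvRepl]; split <;> simp [ih]

theorem pvGetD_tail (vs : List Char) (k : Nat) (d : Char) :
    vs.getD (k + 1) d = vs.tail.getD k d := by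
  cases vs <;> simp [List.getD]

theorem pvRepl_getD (q : Char → Bool) (cs vs : List Char) (i : Nat) (h : i < cs.length) :
    (pvRepl q cs vs).getD i ' ' =
      if q (cs.getD i ' ') then vs.getD ((cs.take i).countP q) (cs.getD i ' ')
      else cs.getD i ' ' := by
  induction cs generalizing vs i with
  | nil => simp at h
  | cons c rest ih =>
    cases i with
    | zero =>
      simp only [pvRepl, List.take_zero, List.countP_nil, List.getD_cons_zero]
      split
      · cases vs <;> rfl
      · rfl
    | succ j =>
      have hj : j < rest.length := by simpa using h
      by_cases hc : q c = true
      · simp only [pvRepl, hc, if_true, List.getD_cons_succ, List.take_succ_cons,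
          List.countP_cons, ih vs.tail j hj]
        split
        · rw [pvGetD_tail]
        · rfl
      · have hc' : q c = false := by simpa using hc
        simp only [pvRepl, hc', Bool.false_eq_true, if_false, List.getD_cons_succ,
          List.take_succ_cons, List.countP_cons, ih vs j hj, Nat.add_zero]

theorem pvRepl_class (q : Char → Bool) (cs vs : List Char)
    (hvs : ∀ v ∈ vs, q v = true) (i : Nat) (h : i < cs.length) :
    q ((pvRepl q cs vs).getD i ' ') = q (cs.getD i ' ') := by
  rw [pvRepl_getD q cs vs i h]
  split
  · rename_i hq
    by_cases hk : (cs.take i).countP q < vs.length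
    · rw [List.getD_eq_getElem _ _ hk]
      rw [hq, hvs _ (List.getElem_mem hk)]
    · rw [List.getD_eq_default _ _ (by omega)]
  · rfl

theorem pvCountP_take_succ (q : Char → Bool) (cs : List Char) (k : Nat) (h : k < cs.length) :
    (cs.take (k + 1)).countP q = (cs.take k).countP q + (if q (cs.getD k ' ') then 1 else 0) := by
  rw [List.take_add_one, List.countP_append, List.getElem?_eq_getElem h,
    List.getD_eq_getElem _ _ h]
  simp [List.countP_cons]

theorem pvCountP_drop (q : Char → Bool) (cs : List Char) (k : Nat) (h : k < cs.length) :
    (cs.drop k).countP q = (if q (cs.getD k ' ') then 1 else 0) + (cs.drop (k + 1)).countP q := by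
  rw [List.drop_eq_getElem_cons h, List.countP_cons, List.getD_eq_getElem _ _ h]
  split <;> omega

theorem pvCountP_split (q : Char → Bool) (cs : List Char) (i : Nat) (h : i < cs.length) :
    cs.countP q = (cs.take i).countP q + (if q (cs.getD i ' ') then 1 else 0) + (cs.drop (i + 1)).countP q := by
  conv_lhs => rw [← List.take_append_drop i cs]
  rw [List.countP_append, pvCountP_drop q cs i h]
  split <;> omega

theorem pvFilter_rank (q : Char → Bool) (cs : List Char) (i : Nat) (d : Char)
    (h : i < cs.length) (hq : q (cs.getD i ' ') = true) :
    (cs.filter q).getD ((cs.take i).countP q) d = cs.getD i d := by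
  induction cs generalizing i with
  | nil => simp at h
  | cons c rest ih =>
    cases i with
    | zero =>
      have hc : q c = true := by simpa using hq
      simp [List.filter_cons_of_pos hc]
    | succ j =>
      have hj : j < rest.length := by simpa using h
      have hq' : q (rest.getD j ' ') = true := by simpa using hq
      rw [List.take_succ_cons, List.countP_cons]
      by_cases hc : q c = true
      · rw [List.filter_cons_of_pos hc]
        simp only [hc, if_true, List.getD_cons_succ]
        exact ih j hj hq'
      · rw [List.filter_cons_of_neg (by simpa using hc)]
        have hc' : q c = false := by simpa using hc
        simp only [hc', Bool.false_eq_true, if_false, Nat.add_zero, List.getD_cons_succ]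
        exact ih j hj hq' 

theorem pvReverse_getD (l : List Char) (k : Nat) (d : Char) (h : k < l.length) :
    l.reverse.getD k d = l.getD (l.length - 1 - k) d := by
  have hpos : 0 < l.length := by omega
  have h2 : l.length - 1 - k < l.length := by omega
  rw [List.getD_eq_getElem _ _ (by simpa using h), List.getD_eq_getElem _ _ h2]
  simp [List.getElem_reverse]

theorem pvCount_take_const (q : Char → Bool) (cs : List Char) (a b : Nat)
    (hab : a ≤ b) (hb : b ≤ cs.length)
    (hnq : ∀ j : Nat, a ≤ j → j < b → ¬ q (cs.getD j ' ') = true) :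
    (cs.take b).countP q = (cs.take a).countP q := by
  induction b, hab using Nat.le_induction with
  | base => rfl
  | succ n hn ih =>
    rw [pvCountP_take_succ q cs n (by omega)]
    have := hnq n hn (by omega)
    simp only [eq_false this, if_false, Nat.add_zero]
    exact ih (by omega) (fun j hj1 hj2 => hnq j hj1 (by omega))

theorem pvCount_drop_const (q : Char → Bool) (cs : List Char) (a b : Nat)
    (hab : a ≤ b) (hb : b ≤ cs.length)
    (hnq : ∀ j : Nat, a ≤ j → j < b → ¬ q (cs.getD j ' ') = true) :
    (cs.drop a).countP q = (cs.drop b).countP q := by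
  induction b, hab using Nat.le_induction with
  | base => rfl
  | succ n hn ih =>
    rw [ih (by omega) (fun j hj1 hj2 => hnq j hj1 (by omega)),
      pvCountP_drop q cs n (by omega)]
    have hf : q (cs.getD n ' ') = false := by simpa using hnq n hn (by omega)
    simpa [List.getD] using hf

theorem pvSkipL_spec (q : Char → Bool) (s : List Char) (l : Int)
    (h0 : 0 ≤ l) (hle : l ≤ (s.length : Int)) :
    l ≤ pvSkipL q s l ∧ pvSkipL q s l ≤ (s.length : Int) ∧
      (∀ i : Int, l ≤ i → i < pvSkipL q s l → ¬ q (pvGet s i) = true) ∧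
      (pvSkipL q s l < (s.length : Int) → q (pvGet s (pvSkipL q s l)) = true) := by
  rw [pvSkipL]
  split
  · rename_i hcond
    obtain ⟨a, b, c, d⟩ := pvSkipL_spec q s (l + 1) (by omega) (by omega)
    refine ⟨by omega, b, ?_, d⟩
    intro i hi1 hi2
    by_cases hil : i = l
    · subst hil; simpa using hcond.2
    · exact c i (by omega) hi2
  · rename_i hcond
    refine ⟨le_refl _, hle, fun i hi1 hi2 => by omega, fun hlt => ?_⟩
    by_cases hq : q (pvGet s l) = true
    · exact hq
    · exact absurd ⟨hlt, hq⟩ hcond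
termination_by ((s.length : Int) - l).toNat
decreasing_by omega

theorem pvSkipR_spec (q : Char → Bool) (s : List Char) (r : Int)
    (h0 : -1 ≤ r) (hle : r < (s.length : Int)) :
    pvSkipR q s r ≤ r ∧ -1 ≤ pvSkipR q s r ∧
      (∀ i : Int, pvSkipR q s r < i → i ≤ r → ¬ q (pvGet s i) = true) ∧
      (0 ≤ pvSkipR q s r → q (pvGet s (pvSkipR q s r)) = true) := by
  rw [pvSkipR]
  split
  · rename_i hcond
    obtain ⟨a, b, c, d⟩ := pvSkipR_spec q s (r - 1) (by omega) (by omega)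
    refine ⟨by omega, b, ?_, d⟩
    intro i hi1 hi2
    by_cases hir : i = r
    · subst hir; simpa using hcond.2
    · exact c i hi1 (by omega)
  · rename_i hcond
    refine ⟨le_refl _, h0, fun i hi1 hi2 => by omega, fun hlt => ?_⟩
    by_cases hq : q (pvGet s r) = true
    · exact hq
    · exact absurd ⟨hlt, hq⟩ hcond
termination_by (r + 1).toNat
decreasing_by omega

theorem pvGet_nonneg (s : List Char) (i : Int) (h : 0 ≤ i) :
    pvGet s i = s.getD i.toNat ' ' := by
  unfold pvGet
  conv_lhs => rw [← Int.toNat_of_nonneg h]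
  rw [PySem.List.pyGetD_natCast]

theorem pvGetD_set_self (s : List Char) (n : Nat) (a : Char) (h : n < s.length) :
    (s.set n a).getD n ' ' = a := by
  rw [List.getD_eq_getElem _ _ (by simpa using h)]
  simp

theorem pvGetD_set_ne (s : List Char) (n m : Nat) (a : Char) (h : n ≠ m) :
    (s.set n a).getD m ' ' = s.getD m ' ' := by
  simp [List.getD, List.getElem?_set_ne h]

theorem pvGetD_eq_of_getD (s t : List Char) (hl : s.length = t.length)
    (h : ∀ i : Nat, i < t.length → s.getD i ' ' = t.getD i ' ') : s = t := by
  apply List.ext_getElem hl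
  intro i h1 h2
  rw [← List.getD_eq_getElem s ' ' h1, ← List.getD_eq_getElem t ' ' h2]
  exact h i h2

theorem pvPass_inv (q : Char → Bool) (cs : List Char) (fuel : Nat) (s : List Char) (l r : Int)
    (hlen : s.length = cs.length)
    (hl : 0 ≤ l) (hr : r < (cs.length : Int))
    (hmid : ∀ i : Nat, i < cs.length → l ≤ (i : Int) → (i : Int) ≤ r →
      s.getD i ' ' = cs.getD i ' ')
    (hout : ∀ i : Nat, i < cs.length → ((i : Int) < l ∨ r < (i : Int)) →
      s.getD i ' ' = (pvRepl q cs ((cs.filter q).reverse)).getD i ' ')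
    (hcnt : l ≤ r → ((cs.take l.toNat).countP q : Int) = ((cs.drop (r + 1).toNat).countP q : Int))
    (hfuel : (r - l + 1).toNat < fuel) :
    pvPass q fuel s l r = pvRepl q cs ((cs.filter q).reverse) := by
  cases fuel with
  | zero => exact absurd hfuel (by omega)
  | succ fuel =>
    have hrev : ∀ v ∈ (cs.filter q).reverse, q v = true := by
      intro v hv
      rw [List.mem_reverse] at hv
      exact (List.mem_filter.mp hv).2
    have hFlen : (pvRepl q cs ((cs.filter q).reverse)).length = cs.length := pvRepl_length _ _ _
    by_cases hlr : l ≤ r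
    · -- loop body executes once more
      have hm : 0 < cs.length := by omega
      have hlN : ((l.toNat : Nat) : Int) = l := Int.toNat_of_nonneg hl
      have hrN : ((r.toNat : Nat) : Int) = r := Int.toNat_of_nonneg (by omega)
      have hlm : l.toNat < cs.length := by omega
      have hrm : r.toNat < cs.length := by omega
      have hclass : ∀ i : Nat, i < cs.length → q (s.getD i ' ') = q (cs.getD i ' ') := by
        intro i him
        by_cases hmidc : l ≤ (i : Int) ∧ (i : Int) ≤ r
        · rw [hmid i him hmidc.1 hmidc.2]
        · rw [hout i him (by omega)]
          exact pvRepl_class q cs _ hrev i him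
      have hflen : (cs.filter q).length = cs.countP q := Eq.symm List.countP_eq_length_filter
      rw [pvPass, if_pos hlr]
      by_cases hsw : (q (pvGet s l) && q (pvGet s r)) = true
      · -- swap branch
        rw [if_pos hsw]
        rw [Bool.and_eq_true] at hsw
        obtain ⟨hql, hqr⟩ := hsw
        rw [pvGet_nonneg s l hl] at hql
        rw [pvGet_nonneg s r (by omega)] at hqr
        have hql' : q (cs.getD l.toNat ' ') = true := by
          rw [← hmid l.toNat hlm (by omega) (by omega)]; exact hql
        have hqr' : q (cs.getD r.toNat ' ') = true := by
          rw [← hmid r.toNat hrm (by omega) (by omega)]; exact hqr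
        set sP := PySem.List.pySetD (PySem.List.pySetD s l (pvGet s r)) r (pvGet s l) with hsPdef
        have hsPeq : sP = (s.set l.toNat (s.getD r.toNat ' ')).set r.toNat (s.getD l.toNat ' ') := by
          rw [hsPdef, pvGet_nonneg s r (by omega), pvGet_nonneg s l hl,
            PySem.List.pySetD_of_nonneg s _ hl, PySem.List.pySetD_of_nonneg _ _ (by omega : (0:Int) ≤ r)]
        have hsPlen : sP.length = cs.length := by rw [hsPeq]; simp [hlen]
        have hgr : sP.getD r.toNat ' ' = cs.getD l.toNat ' ' := by
          rw [hsPeq, pvGetD_set_self _ _ _ (by simp [hlen, hrm]),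
            hmid l.toNat hlm (by omega) (by omega)]
        have hgl : sP.getD l.toNat ' ' = cs.getD r.toNat ' ' := by
          by_cases hlreq : l.toNat = r.toNat
          · rw [hlreq]
            rw [hgr, hlreq]
          · rw [hsPeq, pvGetD_set_ne _ _ _ _ (fun h => hlreq h.symm),
              pvGetD_set_self _ _ _ (by omega), hmid r.toNat hrm (by omega) (by omega)]
        have hother : ∀ i : Nat, i ≠ l.toNat → i ≠ r.toNat → sP.getD i ' ' = s.getD i ' ' := by
          intro i h1 h2
          rw [hsPeq, pvGetD_set_ne _ _ _ _ (fun h => h2 h.symm), pvGetD_set_ne _ _ _ _ (fun h => h1 h.symm)]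
        -- counting facts
        have hsplitl := pvCountP_split q cs l.toNat hlm
        rw [if_pos hql'] at hsplitl
        have hsplitr := pvCountP_split q cs r.toNat hrm
        rw [if_pos hqr'] at hsplitr
        have hcnt' := hcnt hlr
        have hr1 : (r + 1).toNat = r.toNat + 1 := by omega
        rw [hr1] at hcnt'
        have hk : (cs.take l.toNat).countP q = (cs.drop (r.toNat + 1)).countP q := by
          exact_mod_cast hcnt'
        have hFl : (pvRepl q cs ((cs.filter q).reverse)).getD l.toNat ' ' = cs.getD r.toNat ' ' := by
          rw [pvRepl_getD q cs _ l.toNat hlm, if_pos hql',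
            pvReverse_getD _ _ _ (by rw [hflen]; omega)]
          have hidx : (cs.filter q).length - 1 - (cs.take l.toNat).countP q
              = (cs.take r.toNat).countP q := by rw [hflen]; omega
          rw [hidx, pvFilter_rank q cs r.toNat _ hrm hqr',
            List.getD_eq_getElem _ _ hrm, List.getD_eq_getElem _ _ hrm]
        have hFr : (pvRepl q cs ((cs.filter q).reverse)).getD r.toNat ' ' = cs.getD l.toNat ' ' := by
          rw [pvRepl_getD q cs _ r.toNat hrm, if_pos hqr',
            pvReverse_getD _ _ _ (by rw [hflen]; omega)]
          have hidx : (cs.filter q).length - 1 - (cs.take r.toNat).countP q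
              = (cs.take l.toNat).countP q := by rw [hflen]; omega
          rw [hidx, pvFilter_rank q cs l.toNat _ hlm hql',
            List.getD_eq_getElem _ _ hlm, List.getD_eq_getElem _ _ hlm]
        -- skip specs on sP
        obtain ⟨hL1, hL2, hL3, hL4⟩ := pvSkipL_spec q sP (l + 1) (by omega) (by rw [hsPlen]; omega)
        obtain ⟨hR1, hR2, hR3, hR4⟩ := pvSkipR_spec q sP (r - 1) (by omega) (by rw [hsPlen]; omega)
        rw [hsPlen] at hL2 hL4
        have hclass' : ∀ i : Nat, i < cs.length → q (sP.getD i ' ') = q (cs.getD i ' ') := by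
          intro i him
          by_cases h1 : i = r.toNat
          · rw [h1, hgr, hql', hqr']
          by_cases h2 : i = l.toNat
          · rw [h2, hgl, hqr', hql']
          · rw [hother i h2 h1]
            exact hclass i him
        have hL3' : ∀ j : Nat, j < cs.length → l + 1 ≤ (j : Int) →
            (j : Int) < pvSkipL q sP (l + 1) → q (cs.getD j ' ') = false := by
          intro j hjm hj1 hj2
          have h3 := hL3 (j : Int) hj1 hj2
          rw [pvGet_nonneg sP _ (by omega), Int.toNat_natCast] at h3
          rw [← hclass' j hjm]
          simpa using h3
        have hR3' : ∀ j : Nat, j < cs.length → pvSkipR q sP (r - 1) < (j : Int) →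
            (j : Int) ≤ r - 1 → q (cs.getD j ' ') = false := by
          intro j hjm hj1 hj2
          have h3 := hR3 (j : Int) hj1 hj2
          rw [pvGet_nonneg sP _ (by omega), Int.toNat_natCast] at h3
          rw [← hclass' j hjm]
          simpa using h3
        show pvPass q fuel sP (pvSkipL q sP (l + 1)) (pvSkipR q sP (r - 1))
          = pvRepl q cs ((cs.filter q).reverse)
        apply pvPass_inv q cs fuel sP _ _ hsPlen (by omega) (by omega)
        · -- middle untouched
          intro i him hi1 hi2
          rw [hother i (by omega) (by omega)]
          exact hmid i him (by omega) (by omega)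
        · -- outside final
          intro i him hcase
          by_cases h1 : (i : Int) < l
          · rw [hother i (by omega) (by omega)]
            exact hout i him (Or.inl h1)
          by_cases h2 : r < (i : Int)
          · rw [hother i (by omega) (by omega)]
            exact hout i him (Or.inr h2)
          by_cases h3 : i = l.toNat
          · rw [h3, hgl, hFl]
          by_cases h4 : i = r.toNat
          · rw [h4, hgr, hFr]
          · have hnq : q (cs.getD i ' ') = false := by
              rcases hcase with hc1 | hc2
              · exact hL3' i him (by omega) hc1
              · exact hR3' i him hc2 (by omega)
            rw [hother i h3 h4, hmid i him (by omega) (by omega),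
              pvRepl_getD q cs _ i him, if_neg (by rw [hnq]; simp)]
        · -- counts
          intro h12
          have ht1 : (cs.take (pvSkipL q sP (l + 1)).toNat).countP q
              = (cs.take (l.toNat + 1)).countP q := by
            apply pvCount_take_const q cs (l.toNat + 1) _ (by omega) (by omega)
            intro j hj1 hj2
            rw [hL3' j (by omega) (by omega) (by omega)]
            simp
          have ht2 : (cs.take (l.toNat + 1)).countP q = (cs.take l.toNat).countP q + 1 := by
            rw [pvCountP_take_succ q cs l.toNat hlm, if_pos hql']
          have hd1 : (cs.drop (pvSkipR q sP (r - 1) + 1).toNat).countP q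
              = (cs.drop r.toNat).countP q := by
            apply pvCount_drop_const q cs _ r.toNat (by omega) (by omega)
            intro j hj1 hj2
            rw [hR3' j (by omega) (by omega) (by omega)]
            simp
          have hd2 : (cs.drop r.toNat).countP q = 1 + (cs.drop (r.toNat + 1)).countP q := by
            rw [pvCountP_drop q cs r.toNat hrm, if_pos hqr']
          rw [ht1, hd1]
          push_cast [ht2, hd2]
          omega
        · omega
      · -- no swap
        rw [if_neg hsw]
        obtain ⟨hL1, hL2, hL3, hL4⟩ := pvSkipL_spec q s l hl (by rw [hlen]; omega)
        obtain ⟨hR1, hR2, hR3, hR4⟩ := pvSkipR_spec q s r (by omega) (by rw [hlen]; omega)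
        rw [hlen] at hL2 hL4
        have hL3' : ∀ j : Nat, j < cs.length → l ≤ (j : Int) →
            (j : Int) < pvSkipL q s l → q (cs.getD j ' ') = false := by
          intro j hjm hj1 hj2
          have h3 := hL3 (j : Int) hj1 hj2
          rw [pvGet_nonneg s _ (by omega), Int.toNat_natCast] at h3
          rw [← hclass j hjm]
          simpa using h3
        have hR3' : ∀ j : Nat, j < cs.length → pvSkipR q s r < (j : Int) →
            (j : Int) ≤ r → q (cs.getD j ' ') = false := by
          intro j hjm hj1 hj2
          have h3 := hR3 (j : Int) hj1 hj2
          rw [pvGet_nonneg s _ (by omega), Int.toNat_natCast] at h3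
          rw [← hclass j hjm]
          simpa using h3
        have hprog : l + 1 ≤ pvSkipL q s l ∨ pvSkipR q s r ≤ r - 1 := by
          by_contra hcon
          push Not at hcon
          obtain ⟨hc1, hc2⟩ := hcon
          have he1 : pvSkipL q s l = l := by omega
          have he2 : pvSkipR q s r = r := by omega
          have hq1 := hL4 (by omega)
          have hq2 := hR4 (by omega)
          rw [he1] at hq1
          rw [he2] at hq2
          exact hsw (by rw [Bool.and_eq_true]; exact ⟨hq1, hq2⟩)
        show pvPass q fuel s (pvSkipL q s l) (pvSkipR q s r)
          = pvRepl q cs ((cs.filter q).reverse)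
        apply pvPass_inv q cs fuel s _ _ hlen (by omega) (by omega)
        · intro i him hi1 hi2
          exact hmid i him (by omega) (by omega)
        · intro i him hcase
          by_cases h1 : (i : Int) < l
          · exact hout i him (Or.inl h1)
          by_cases h2 : r < (i : Int)
          · exact hout i him (Or.inr h2)
          · have hnq : q (cs.getD i ' ') = false := by
              rcases hcase with hc1 | hc2
              · exact hL3' i him (by omega) hc1
              · exact hR3' i him hc2 (by omega)
            rw [hmid i him (by omega) (by omega),
              pvRepl_getD q cs _ i him, if_neg (by rw [hnq]; simp)]
        · intro h12
          have ht1 : (cs.take (pvSkipL q s l).toNat).countP q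
              = (cs.take l.toNat).countP q := by
            apply pvCount_take_const q cs l.toNat _ (by omega) (by omega)
            intro j hj1 hj2
            rw [hL3' j (by omega) (by omega) (by omega)]
            simp
          have hd1 : (cs.drop (pvSkipR q s r + 1).toNat).countP q
              = (cs.drop (r + 1).toNat).countP q := by
            apply pvCount_drop_const q cs _ (r + 1).toNat (by omega) (by omega)
            intro j hj1 hj2
            rw [hR3' j (by omega) (by omega) (by omega)]
            simp
          rw [ht1, hd1]
          exact hcnt hlr
        · omega
    · -- loop exit: everything is final
      rw [pvPass, if_neg hlr]
      apply pvGetD_eq_of_getD s _ (by rw [hlen, hFlen])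
      intro i hi
      have him : i < cs.length := by rwa [hFlen] at hi
      exact hout i him (by omega)
termination_by fuel

theorem pvMainLemma (q : Char → Bool) (cs : List Char) :
    pvPass q (cs.length + 1) cs 0 ((cs.length : Int) - 1)
      = pvRepl q cs ((cs.filter q).reverse) := by
  have hdrop : (((cs.length : Int) - 1 + 1)).toNat = cs.length := by omega
  apply pvPass_inv q cs (cs.length + 1) cs 0 ((cs.length : Int) - 1) rfl (le_refl 0)
    (by omega) (fun i _ _ _ => rfl)
  · intro i him habs
    omega
  · intro _
    rw [Int.toNat_zero, hdrop, List.take_zero, List.drop_length]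
  · omega

theorem pvInterleave_eq (cs ls os : List Char)
    (hls : ∀ v ∈ ls, PySem.Chars.islower v = true) :
    pvInterleave cs ls os
      = pvRepl (fun c => !PySem.Chars.islower c)
          (pvRepl (fun c => PySem.Chars.islower c) cs ls) os := by
  induction cs generalizing ls os hls with
  | nil => rfl
  | cons c rest ih =>
    by_cases hc : PySem.Chars.islower c = true
    · have hh : PySem.Chars.islower (ls.headD c) = true := by
        cases ls with
        | nil => simpa using hc
        | cons v t => exact hls v (by simp)
      simp only [pvInterleave, pvRepl, hc, if_true, hh, Bool.not_true, Bool.false_eq_true,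
        if_false]
      rw [ih ls.tail os (fun v hv => hls v (List.mem_of_mem_tail hv))]
    · have hc' : PySem.Chars.islower c = false := by simpa using hc
      simp only [pvInterleave, pvRepl, hc', Bool.false_eq_true, if_false, Bool.not_false,
        if_true]
      rw [ih ls os.tail hls]

theorem pvFilter_repl (q : Char → Bool) (cs vs : List Char)
    (hvs : ∀ v ∈ vs, q v = true) :
    (pvRepl q cs vs).filter (fun c => !q c) = cs.filter (fun c => !q c) := by
  induction cs generalizing vs with
  | nil => rfl
  | cons c rest ih =>
    by_cases hc : q c = true
    · have hh : q (vs.headD c) = true := by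
        cases vs with
        | nil => simpa using hc
        | cons v t => exact hvs v (by simp)
      simp only [pvRepl, hc, if_true]
      rw [List.filter_cons_of_neg (by simpa using hh), List.filter_cons_of_neg (by simpa using hc)]
      exact ih vs.tail (fun v hv => hvs v (List.mem_of_mem_tail hv))
    · have hc' : q c = false := by simpa using hc
      simp only [pvRepl, hc', Bool.false_eq_true, if_false]
      rw [List.filter_cons_of_pos (by simp [hc']), List.filter_cons_of_pos (by simp [hc']),
        ih vs hvs]

-- ===== VERDICT (by name: the statement is the Claim_ definition above) =====
theorem reverseByType_spec : Claim_equal_reverseByType := by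
  unfold Claim_equal_reverseByType
  intro s _
  unfold Spec_reverseByType reverseByType reverseByType_alt
  simp only []
  have h1 := pvMainLemma (fun c => PySem.Chars.islower c) s.toList
  rw [h1]
  have hlen1 : (pvRepl (fun c => PySem.Chars.islower c) s.toList
      ((s.toList.filter fun c => PySem.Chars.islower c).reverse)).length = s.toList.length :=
    pvRepl_length _ _ _
  rw [← hlen1]
  rw [pvMainLemma (fun c => !PySem.Chars.islower c) _]
  have hvs : ∀ v ∈ (s.toList.filter fun c => PySem.Chars.islower c).reverse,
      PySem.Chars.islower v = true := by
    intro v hv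
    rw [List.mem_reverse] at hv
    exact (List.mem_filter.mp hv).2
  rw [pvFilter_repl (fun c => PySem.Chars.islower c) s.toList _ hvs]
  rw [pvInterleave_eq s.toList _ _ hvs]
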